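-- pv_equiv track=rewrite | github.com/Idontwan/SISG4HEI_Alpha | Human_Path_Generation/Dest_nodes.py | fur_dest
-- ===== SOURCE A (Python) =====
-- def fur_dest(X0, Y0, x, y, L, W, index, g_L=5, g_W=5):
--     nodes = [[], [], [], []]
--     dest = []
--     I0, J0 = (x-X0)//g_L, (y-Y0)//g_W
--     I1, J1 = I0+L//g_L, J0+W//g_W
--     for t in range(I0, I1):
--         nodes[0].append([t, J0-5])
--         nodes[2].append([t, J1+4])
--     for t in range(J0, J1):
--         nodes[1].append([I0-5, t])
--         nodes[3].append([I1+4, t])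
--     for i in index:
--         for [I, J] in nodes[i]: dest.append([I, J])
--     return dest
-- ===== SOURCE B (Python) =====
-- def fur_dest(X0, Y0, x, y, L, W, index, g_L=5, g_W=5):
--     I0, J0 = (x - X0) // g_L, (y - Y0) // g_W
--     nI, nJ = L // g_L, W // g_W
--     dest = []
--     for i in index:
--         k = i % 4
--         if k % 2 == 0:
--             c = J0 - 5 + (k // 2) * (nJ + 9)
--             dest.extend([I0 + t, c] for t in range(nI))
--         else:
--             c = I0 - 5 + (k // 2) * (nI + 9)
--             dest.extend([c, J0 + t] for t in range(nJ))
--     return dest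
-- ===== Notes on version B (the rewrite author's own statement) =====
-- stated objective: alternative
-- what changed: B replaces A's four materialised node buffers (and the copy loop over nodes[i]) by a single pass over index that computes each requested side arithmetically: k = i % 4 picks the side, k's parity picks the axis, and the fixed coordinate is a closed-form expression J0-5+(k//2)*(nJ+9) resp. I0-5+(k//2)*(nI+9), so the points are emitted directly from a 0-based range with no side tables at all.
import Mathlib
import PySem

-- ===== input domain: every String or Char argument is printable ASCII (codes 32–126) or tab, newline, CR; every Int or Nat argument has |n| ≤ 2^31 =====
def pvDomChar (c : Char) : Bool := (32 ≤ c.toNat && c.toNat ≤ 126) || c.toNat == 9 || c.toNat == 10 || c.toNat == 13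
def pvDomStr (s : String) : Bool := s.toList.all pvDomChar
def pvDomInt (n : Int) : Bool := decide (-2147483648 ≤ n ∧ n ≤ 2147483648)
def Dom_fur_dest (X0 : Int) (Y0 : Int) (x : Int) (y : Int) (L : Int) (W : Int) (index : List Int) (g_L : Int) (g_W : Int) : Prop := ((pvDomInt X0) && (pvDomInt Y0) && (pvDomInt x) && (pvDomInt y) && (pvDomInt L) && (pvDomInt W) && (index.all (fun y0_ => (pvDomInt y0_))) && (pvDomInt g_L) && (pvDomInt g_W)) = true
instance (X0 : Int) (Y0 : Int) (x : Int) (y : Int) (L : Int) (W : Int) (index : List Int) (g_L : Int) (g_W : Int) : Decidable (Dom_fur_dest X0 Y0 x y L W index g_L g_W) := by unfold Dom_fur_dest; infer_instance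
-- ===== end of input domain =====

-- B replaces A's four precomputed node buffers by an arithmetic per-index side
-- formula (k = i % 4, parity picks the axis, closed-form fixed coordinate);
-- objective: alternative (same output, no side tables).

-- ===== PORT A =====
-- literal transliteration: build the four `nodes` lists by appending along the two
-- ranges (a paired foldl = the one Python loop filling nodes[0]/nodes[2], resp. the
-- one filling nodes[1]/nodes[3]), then for i in index copy nodes[i] point by point
-- (pyGet? = Python list indexing; none = IndexError, excluded by Pre_)
def fur_dest (X0 : Int) (Y0 : Int) (x : Int) (y : Int) (L : Int) (W : Int) (index : List Int) (g_L : Int) (g_W : Int) : List (List Int) :=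
  let I0 := PySem.Int.floordiv (x - X0) g_L
  let J0 := PySem.Int.floordiv (y - Y0) g_W
  let I1 := I0 + PySem.Int.floordiv L g_L
  let J1 := J0 + PySem.Int.floordiv W g_W
  let p02 := (PySem.List.pyRange I0 I1 1).foldl
      (fun (ac : List (List Int) × List (List Int)) t => (ac.1 ++ [[t, J0 - 5]], ac.2 ++ [[t, J1 + 4]])) ([], [])
  let p13 := (PySem.List.pyRange J0 J1 1).foldl
      (fun (ac : List (List Int) × List (List Int)) t => (ac.1 ++ [[I0 - 5, t]], ac.2 ++ [[I1 + 4, t]])) ([], [])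
  let nodes := [p02.1, p13.1, p02.2, p13.2]
  index.foldl (fun dest i =>
    match PySem.List.pyGet? nodes i with
    | some side => side.foldl (fun d p => d ++ [p]) dest
    | none => dest) []

-- ===== PORT B =====
-- transliteration of Source B: one pass over index; k = i % 4 (Python mod),
-- even k → horizontal side at fixed J0-5+(k//2)*(nJ+9), odd k → vertical side
-- at fixed I0-5+(k//2)*(nI+9); points emitted from a 0-based range
def fur_dest_alt (X0 : Int) (Y0 : Int) (x : Int) (y : Int) (L : Int) (W : Int) (index : List Int) (g_L : Int) (g_W : Int) : List (List Int) :=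
  let I0 := PySem.Int.floordiv (x - X0) g_L
  let J0 := PySem.Int.floordiv (y - Y0) g_W
  let nI := PySem.Int.floordiv L g_L
  let nJ := PySem.Int.floordiv W g_W
  index.foldl (fun dest i =>
    let k := PySem.Int.mod i 4
    if PySem.Int.mod k 2 = 0 then
      let c := J0 - 5 + (PySem.Int.floordiv k 2) * (nJ + 9)
      dest ++ (PySem.List.pyRange 0 nI 1).map (fun t => [I0 + t, c])
    else
      let c := I0 - 5 + (PySem.Int.floordiv k 2) * (nI + 9)
      dest ++ (PySem.List.pyRange 0 nJ 1).map (fun t => [c, J0 + t])) []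

-- ===== PRECONDITION & SPEC =====
-- Pre_ excludes exactly the inputs where A raises: g_L = 0 or g_W = 0
-- (ZeroDivisionError) and an index entry outside -4..3 (IndexError).
def Pre_fur_dest (X0 : Int) (Y0 : Int) (x : Int) (y : Int) (L : Int) (W : Int) (index : List Int) (g_L : Int) (g_W : Int) : Prop :=
  g_L ≠ 0 ∧ g_W ≠ 0 ∧ ∀ i ∈ index, -4 ≤ i ∧ i < 4
instance (X0 : Int) (Y0 : Int) (x : Int) (y : Int) (L : Int) (W : Int) (index : List Int) (g_L : Int) (g_W : Int) : Decidable (Pre_fur_dest X0 Y0 x y L W index g_L g_W) := by unfold Pre_fur_dest; infer_instance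

def pvWitness_fur_dest : Int × Int × Int × Int × Int × Int × List Int × Int × Int := (0, 0, 10, 10, 20, 15, [0, 2, -1], 5, 5)

def Spec_fur_dest (X0 : Int) (Y0 : Int) (x : Int) (y : Int) (L : Int) (W : Int) (index : List Int) (g_L : Int) (g_W : Int) (out : List (List Int)) : Prop := out = fur_dest_alt X0 Y0 x y L W index g_L g_W
instance (X0 : Int) (Y0 : Int) (x : Int) (y : Int) (L : Int) (W : Int) (index : List Int) (g_L : Int) (g_W : Int) (out : List (List Int)) : Decidable (Spec_fur_dest X0 Y0 x y L W index g_L g_W out) := by unfold Spec_fur_dest; infer_instance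

-- ===== CLAIM =====
def Claim_equal_fur_dest : Prop := ∀ (X0 : Int) (Y0 : Int) (x : Int) (y : Int) (L : Int) (W : Int) (index : List Int) (g_L : Int) (g_W : Int), Dom_fur_dest X0 Y0 x y L W index g_L g_W → Pre_fur_dest X0 Y0 x y L W index g_L g_W → Spec_fur_dest X0 Y0 x y L W index g_L g_W (fur_dest X0 Y0 x y L W index g_L g_W)

-- ===== LEMMAS AND PROOFS =====

-- A's paired append-loop builds exactly the two mapped ranges
theorem fd_pair (r : List Int) (f g : Int → List Int) :
    r.foldl (fun (ac : List (List Int) × List (List Int)) t => (ac.1 ++ [f t], ac.2 ++ [g t])) ([], [])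
    = (r.map f, r.map g) := by
  rw [PySem.List.foldl_prod_mk (fun a t => a ++ [f t]) (fun a t => a ++ [g t])]
  rw [PySem.List.foldl_append_singleton_eq_map, PySem.List.foldl_append_singleton_eq_map]
  simp

theorem fms {α β : Type} (f : α → β) (l : List α) : (List.map (fun x => [f x]) l).flatten = List.map f l := by
  induction l with | nil => rfl | cons a l ih => simp [ih]
theorem fms' {α β : Type} (f : α → β) (l : List α) : (List.map ((fun x => [x]) ∘ f) l).flatten = List.map f l := by
  induction l with | nil => rfl | cons a l ih => simp [ih]
theorem fd_range_shift (a n : Int) (f : Int → List Int) :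
    (PySem.List.pyRange a (a + n) 1).map f
    = (PySem.List.pyRange 0 n 1).map (fun t => f (a + t)) := by
  rw [PySem.List.pyRange_one, PySem.List.pyRange_one]
  simp [List.map_map, Function.comp_def]
theorem fd_step_eq (I0 J0 nI nJ : Int) (i : Int) (hi : -4 ≤ i ∧ i < 4) (dest : List (List Int)) :
    (match PySem.List.pyGet?
        [(PySem.List.pyRange I0 (I0 + nI) 1).map (fun t => [t, J0 - 5]),
         (PySem.List.pyRange J0 (J0 + nJ) 1).map (fun t => [I0 - 5, t]),
         (PySem.List.pyRange I0 (I0 + nI) 1).map (fun t => [t, J0 + nJ + 4]),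
         (PySem.List.pyRange J0 (J0 + nJ) 1).map (fun t => [I0 + nI + 4, t])] i with
     | some side => side.foldl (fun d p => d ++ [p]) dest
     | none => dest)
    = (let k := PySem.Int.mod i 4
       if PySem.Int.mod k 2 = 0 then
         let c := J0 - 5 + (PySem.Int.floordiv k 2) * (nJ + 9)
         dest ++ (PySem.List.pyRange 0 nI 1).map (fun t => [I0 + t, c])
       else
         let c := I0 - 5 + (PySem.Int.floordiv k 2) * (nI + 9)
         dest ++ (PySem.List.pyRange 0 nJ 1).map (fun t => [c, J0 + t])) := by
  obtain ⟨h1, h2⟩ := hi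
  have hI := fd_range_shift I0 nI
  have hJ := fd_range_shift J0 nJ
  interval_cases i <;>
    simp only [PySem.List.pyGet?, PySem.List.pyIdx?] <;>
    norm_num [fms, fms', hI, hJ,
      show PySem.Int.mod (-4) 4 = 0 from by decide, show PySem.Int.mod (-3) 4 = 1 from by decide,
      show PySem.Int.mod (-2) 4 = 2 from by decide, show PySem.Int.mod (-1) 4 = 3 from by decide,
      show PySem.Int.mod 0 4 = 0 from by decide, show PySem.Int.mod 1 4 = 1 from by decide,
      show PySem.Int.mod 2 4 = 2 from by decide, show PySem.Int.mod 3 4 = 3 from by decide,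
      show PySem.Int.mod 0 2 = 0 from by decide, show PySem.Int.mod 1 2 = 1 from by decide,
      show PySem.Int.mod 2 2 = 0 from by decide, show PySem.Int.mod 3 2 = 1 from by decide,
      show PySem.Int.floordiv 0 2 = 0 from by decide, show PySem.Int.floordiv 1 2 = 0 from by decide,
      show PySem.Int.floordiv 2 2 = 1 from by decide, show PySem.Int.floordiv 3 2 = 1 from by decide,
      show Int.toNat 2 = 2 from rfl, show Int.toNat 3 = 3 from rfl] <;>
    (first
      | rfl
      | (intros; ring))

-- fold the per-step equality along index
theorem fd_fold_eq (I0 J0 nI nJ : Int) (index : List Int)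
    (hidx : ∀ i ∈ index, -4 ≤ i ∧ i < 4) (dest : List (List Int)) :
    index.foldl (fun dest i =>
      match PySem.List.pyGet?
          [(PySem.List.pyRange I0 (I0 + nI) 1).map (fun t => [t, J0 - 5]),
           (PySem.List.pyRange J0 (J0 + nJ) 1).map (fun t => [I0 - 5, t]),
           (PySem.List.pyRange I0 (I0 + nI) 1).map (fun t => [t, J0 + nJ + 4]),
           (PySem.List.pyRange J0 (J0 + nJ) 1).map (fun t => [I0 + nI + 4, t])] i with
       | some side => side.foldl (fun d p => d ++ [p]) dest
       | none => dest) dest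
    = index.foldl (fun dest i =>
        let k := PySem.Int.mod i 4
        if PySem.Int.mod k 2 = 0 then
          let c := J0 - 5 + (PySem.Int.floordiv k 2) * (nJ + 9)
          dest ++ (PySem.List.pyRange 0 nI 1).map (fun t => [I0 + t, c])
        else
          let c := I0 - 5 + (PySem.Int.floordiv k 2) * (nI + 9)
          dest ++ (PySem.List.pyRange 0 nJ 1).map (fun t => [c, J0 + t])) dest := by
  induction index generalizing dest with
  | nil => rfl
  | cons i rest ih =>
    rw [List.foldl_cons, List.foldl_cons,
        fd_step_eq I0 J0 nI nJ i (hidx i (List.mem_cons_self ..)) dest]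
    exact ih (fun j hj => hidx j (List.mem_cons_of_mem _ hj)) _

-- ===== VERDICT =====
theorem fur_dest_spec : Claim_equal_fur_dest := by
  intro X0 Y0 x y L W index g_L g_W _ hpre
  unfold Spec_fur_dest fur_dest fur_dest_alt
  simp only [fd_pair]
  exact fd_fold_eq _ _ _ _ index hpre.2.2 []
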